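-- pv_equiv track=rewrite | github.com/shahraj81/rufes | tools/scorer/score_submission.py | expanded_types
-- ===== SOURCE A (Python) =====
-- def expanded_types(entity_types):
--     def expand(entity_type):
--         """
--         If the type is:
--             'A.B.C' return ['A', 'A.B', 'A.B.C']
--             'A.B'   return ['A', 'A.B']
--             'A'     return ['A']
--         """
--         metatype = 'Entity'
--         expanded_types = {}
--         elements = entity_type.split('.')
--         for end_index in range(len(elements)):
--             if metatype != 'Entity' and end_index == 0: continue
--             start_index = 0
--             expanded_type_elements = []
--             while start_index <= end_index:
--                 expanded_type_elements.append(elements[start_index])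
--                 start_index += 1
--             if len(expanded_type_elements):
--                 expanded_types['.'.join(expanded_type_elements)] = 1
--         return list(expanded_types.keys())
--     expanded_types = set()
--     for entity_type in entity_types:
--         for expanded_type in expand(entity_type):
--             expanded_types.add(expanded_type)
--     return expanded_types
-- ===== SOURCE B (Python) =====
-- def expanded_types(entity_types):
--     result = set()
--     for t in entity_types:
--         prefix = ''
--         for ch in t:
--             if ch == '.':
--                 result.add(prefix)
--             prefix += ch
--         result.add(prefix)
--     return result
-- ===== Notes on version B (the rewrite author's own statement) =====
-- stated objective: simpler
-- what changed: A splits each type on '.', then for every end index rebuilds the element prefix with an inner while loop and rejoins it into a dict; B makes a single left-to-right character scan per string, emitting the running prefix at each dot and the full string at the end, directly into one set.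
import Mathlib
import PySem

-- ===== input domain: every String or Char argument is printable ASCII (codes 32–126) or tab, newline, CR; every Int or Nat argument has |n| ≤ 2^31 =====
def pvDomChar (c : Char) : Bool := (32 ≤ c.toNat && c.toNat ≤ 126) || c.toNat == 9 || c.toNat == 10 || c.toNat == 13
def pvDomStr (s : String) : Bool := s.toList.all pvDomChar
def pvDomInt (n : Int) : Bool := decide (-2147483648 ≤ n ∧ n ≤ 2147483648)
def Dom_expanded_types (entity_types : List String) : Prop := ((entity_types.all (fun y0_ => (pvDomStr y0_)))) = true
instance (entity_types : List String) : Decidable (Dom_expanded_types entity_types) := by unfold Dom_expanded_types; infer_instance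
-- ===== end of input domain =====

-- B replaces A's split/rebuild-and-join machinery by a single left-to-right character scan
-- that maintains the running prefix and emits it at each dot (objective: simpler).

-- ===== PORT A =====
-- Strings are handled on the List Char side (PySem convention); String.ofList converts the keys back.
-- inner helper `expand`: split on '.', then for each end_index rebuild elements[0..end_index] and join
def pvExpandDict (elements : List (List Char)) : PySem.Dict (List Char) Int :=
  (PySem.List.pyRange 0 (PySem.List.len elements)).foldl
    (fun d endIndex =>
      -- `if metatype != 'Entity' and end_index == 0: continue`, with metatype = 'Entity'
      if ("Entity" : String) ≠ "Entity" ∧ endIndex = 0 then d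
      else
        -- while start_index <= end_index: append elements[start_index]
        let expandedTypeElements :=
          (PySem.List.pyRange 0 (endIndex + 1)).foldl
            (fun acc startIndex => acc ++ [PySem.List.pyGetD elements startIndex []]) []
        if expandedTypeElements.length ≠ 0 then
          d.insert (PySem.Chars.join ['.'] expandedTypeElements) 1
        else d)
    (PySem.Dict.mk [])

def pvExpand (entity_type : String) : List String :=
  (pvExpandDict (PySem.Chars.splitOn entity_type.toList ['.'])).keys.map String.ofList

def expanded_types (entity_types : List String) : List String :=
  entity_types.foldl (fun s t => (pvExpand t).foldl PySem.Set.add s) PySem.Set.empty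

-- ===== PORT B =====
-- scan the characters once, keeping the prefix read so far; emit it at every '.', and the full string at the end
def pvScanB : List Char → List Char → PySem.Set String → PySem.Set String
  | pre, [], s => PySem.Set.add s (String.ofList pre)
  | pre, c :: rest, s =>
      pvScanB (pre ++ [c]) rest (if c = '.' then PySem.Set.add s (String.ofList pre) else s)

def expanded_types_alt (entity_types : List String) : List String :=
  entity_types.foldl (fun s t => pvScanB [] t.toList s) PySem.Set.empty

-- ===== PRECONDITION & SPEC =====
def Spec_expanded_types (entity_types : List String) (out : List String) : Prop := out = expanded_types_alt entity_types
instance (entity_types : List String) (out : List String) : Decidable (Spec_expanded_types entity_types out) := by unfold Spec_expanded_types; infer_instance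

-- ===== CLAIM (what is proved, stated in full; the proofs are below) =====
def Claim_equal_expanded_types : Prop := ∀ (entity_types : List String), Dom_expanded_types entity_types → Spec_expanded_types entity_types (expanded_types entity_types)

-- ===== LEMMAS AND PROOFS =====

-- structural version of s.split('.')
def pvSplit : List Char → List (List Char)
  | [] => [[]]
  | c :: cs => if c = '.' then [] :: pvSplit cs else (pvSplit cs).modifyHead (c :: ·)

-- the non-empty element-prefix joins of an element list
def pvJoins : List (List Char) → List (List Char)
  | [] => []
  | e :: rest => e :: (pvJoins rest).map (fun q => e ++ '.' :: q)

-- the strings B adds for a given character list: the slice before each dot, then the whole list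
def pvAddSeq : List Char → List (List Char)
  | [] => [[]]
  | c :: cs => (if c = '.' then [[]] else []) ++ (pvAddSeq cs).map (c :: ·)

theorem pvSplit_ne_nil (cs : List Char) : pvSplit cs ≠ [] := by
  cases cs with
  | nil => simp [pvSplit]
  | cons c cs =>
    simp only [pvSplit]
    split
    · simp
    · cases h : pvSplit cs with
      | nil => exact absurd h (pvSplit_ne_nil cs)
      | cons a l => simp

theorem pvSplitOn_go (fuel : Nat) : ∀ (l cur : List Char) (acc : List (List Char)),
    l.length < fuel →
    PySem.Chars.splitOn.go ['.'] fuel l cur acc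
      = acc.reverse ++ (pvSplit l).modifyHead (cur.reverse ++ ·) := by
  induction fuel with
  | zero => intro l cur acc h; omega
  | succ fuel ih =>
    intro l cur acc h
    cases l with
    | nil => simp [PySem.Chars.splitOn.go, pvSplit]
    | cons c rest =>
      by_cases hc : c = '.'
      · subst hc
        rw [show PySem.Chars.splitOn.go ['.'] (fuel+1) ('.' :: rest) cur acc
              = PySem.Chars.splitOn.go ['.'] fuel rest [] (cur.reverse :: acc) by
            simp [PySem.Chars.splitOn.go, List.isPrefixOf]]
        rw [ih rest [] (cur.reverse :: acc) (by simpa using h)]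
        cases hs : pvSplit rest with
        | nil => exact absurd hs (pvSplit_ne_nil rest)
        | cons a as => simp [pvSplit, hs]
      · rw [show PySem.Chars.splitOn.go ['.'] (fuel+1) (c :: rest) cur acc
              = PySem.Chars.splitOn.go ['.'] fuel rest (c :: cur) acc by
            simp [PySem.Chars.splitOn.go, List.isPrefixOf, Ne.symm hc]]
        rw [ih rest (c :: cur) acc (by simpa using h)]
        simp only [pvSplit, if_neg hc]
        cases hs : pvSplit rest with
        | nil => exact absurd hs (pvSplit_ne_nil rest)
        | cons a as => simp

theorem pvSplitOn_dot (cs : List Char) : PySem.Chars.splitOn cs ['.'] = pvSplit cs := by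
  rw [PySem.Chars.splitOn, pvSplitOn_go (cs.length + 1) cs [] [] (by omega)]
  cases hs : pvSplit cs with
  | nil => exact absurd hs (pvSplit_ne_nil cs)
  | cons a as => simp

theorem pvAddSeq_eq (cs : List Char) : pvAddSeq cs = pvJoins (pvSplit cs) := by
  induction cs with
  | nil => simp [pvAddSeq, pvSplit, pvJoins]
  | cons c cs ih =>
    by_cases hc : c = '.'
    · subst hc
      rw [show pvSplit ('.' :: cs) = [] :: pvSplit cs from by simp [pvSplit]]
      rw [show pvJoins ([] :: pvSplit cs)
            = [] :: (pvJoins (pvSplit cs)).map (fun q => [] ++ '.' :: q) from rfl]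
      simp [pvAddSeq, ih]
    · simp only [pvAddSeq, pvSplit, if_neg hc, ih]
      cases hs : pvSplit cs with
      | nil => exact absurd hs (pvSplit_ne_nil cs)
      | cons a as =>
        simp [pvJoins, List.map_map]

theorem pvInner_take (els : List (List Char)) (n : Nat) (h : n ≤ els.length) :
    (PySem.List.pyRange 0 ((n : Int))).foldl
      (fun acc startIndex => acc ++ [PySem.List.pyGetD els startIndex []]) []
      = els.take n := by
  rw [PySem.List.pyRange_zero_natCast, List.foldl_map]
  induction n with
  | zero => simp
  | succ n ih =>
    rw [List.range_succ, List.foldl_append, ih (by omega)]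
    have hn : n < els.length := by omega
    rw [List.foldl_cons, List.foldl_nil, PySem.List.pyGetD_natCast,
      List.getD_eq_getElem _ _ hn, List.take_add_one, List.getElem?_eq_getElem hn]
    simp

theorem pvKeys_insert_fresh (d : PySem.Dict (List Char) Int) (k : List Char)
    (h : k ∉ d.keys) : (d.insert k 1).keys = d.keys ++ [k] := by
  have hc : d.contains k = false := by
    rw [PySem.Dict.contains]
    simp only [List.any_eq_false]
    intro p hp
    simp only [beq_iff_eq]
    intro he
    apply h
    rw [PySem.Dict.keys]
    exact he ▸ List.mem_map_of_mem (f := Prod.fst) hp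
  simp [PySem.Dict.insert, hc, PySem.Dict.keys]

theorem pvDict_fold_keys (ks : List (List Char)) :
    ∀ (d : PySem.Dict (List Char) Int), (d.keys ++ ks).Nodup →
    (ks.foldl (fun d k => d.insert k 1) d).keys = d.keys ++ ks := by
  induction ks with
  | nil => intro d _; simp
  | cons k ks ih =>
    intro d hnd
    have hk : k ∉ d.keys := by
      intro hmem
      exact (List.disjoint_of_nodup_append hnd) hmem (by simp)
    rw [List.foldl_cons, ih (d.insert k 1)
        (by rw [pvKeys_insert_fresh d k hk]; simpa using hnd),
      pvKeys_insert_fresh d k hk]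
    simp

theorem pvTake_cons {α : Type} (l : List α) (n : Nat) (h : n < l.length) :
    ∃ a as, l.take (n + 1) = a :: as := by
  cases ht : l.take (n + 1) with
  | nil =>
    have hl := congrArg List.length ht
    rw [List.length_take] at hl
    simp only [List.length_nil] at hl
    omega
  | cons a as => exact ⟨a, as, rfl⟩

theorem pvJoins_map_range (els : List (List Char)) :
    (List.range els.length).map (fun j => PySem.Chars.join ['.'] (els.take (j + 1)))
      = pvJoins els := by
  induction els with
  | nil => simp [pvJoins]
  | cons e rest ih =>
    rw [List.length_cons, List.range_succ_eq_map]
    simp only [List.map_cons, List.map_map, pvJoins]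
    congr 1
    · simp [PySem.Chars.join_singleton]
    · rw [← ih, List.map_map]
      apply List.map_congr_left
      intro j hj
      have hj' : j < rest.length := List.mem_range.mp hj
      obtain ⟨a, as, ha⟩ := pvTake_cons rest j hj'
      simp only [Function.comp_apply, Nat.succ_eq_add_one, List.take_succ_cons, ha,
        PySem.Chars.join_cons_cons]
      simp

theorem pvJoins_pairwise (els : List (List Char)) :
    (pvJoins els).Pairwise (fun a b => a.length < b.length) := by
  induction els with
  | nil => simp [pvJoins]
  | cons e rest ih =>
    simp only [pvJoins, List.pairwise_cons]
    constructor
    · intro b hb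
      obtain ⟨q, _, rfl⟩ := List.mem_map.mp hb
      simp
    · rw [List.pairwise_map]
      exact ih.imp (by intro a b h; simpa using h)

theorem pvJoins_nodup (els : List (List Char)) : (pvJoins els).Nodup := by
  refine (pvJoins_pairwise els).imp ?_
  intro a b h he
  subst he; omega

theorem pvExpandDict_keys (els : List (List Char)) :
    (pvExpandDict els).keys = pvJoins els := by
  unfold pvExpandDict
  rw [show PySem.List.len els = ((els.length : Nat) : Int) from by simp [PySem.List.len]]
  rw [PySem.List.pyRange_zero_natCast, List.foldl_map]
  have hbody : ∀ (d : PySem.Dict (List Char) Int) (k : Nat), k < els.length →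
      (fun (d : PySem.Dict (List Char) Int) (endIndex : Int) =>
        if ("Entity" : String) ≠ "Entity" ∧ endIndex = 0 then d
        else
          let expandedTypeElements :=
            (PySem.List.pyRange 0 (endIndex + 1)).foldl
              (fun acc startIndex => acc ++ [PySem.List.pyGetD els startIndex []]) []
          if expandedTypeElements.length ≠ 0 then
            d.insert (PySem.Chars.join ['.'] expandedTypeElements) 1
          else d) d (k : Int)
      = d.insert (PySem.Chars.join ['.'] (els.take (k + 1))) 1 := by
    intro d k hk
    have h1 : ((k : Int) + 1) = ((k + 1 : Nat) : Int) := by push_cast; ring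
    obtain ⟨a, as, ha⟩ := pvTake_cons els k hk
    simp only [ne_eq, not_true_eq_false, false_and, if_false, h1,
      pvInner_take els (k + 1) (by omega), ha]
    simp
  have hfold : ∀ (ks : List Nat) (d : PySem.Dict (List Char) Int),
      (∀ k ∈ ks, k < els.length) →
      ks.foldl (fun d (k : Nat) =>
        (fun (d : PySem.Dict (List Char) Int) (endIndex : Int) =>
          if ("Entity" : String) ≠ "Entity" ∧ endIndex = 0 then d
          else
            let expandedTypeElements :=
              (PySem.List.pyRange 0 (endIndex + 1)).foldl
                (fun acc startIndex => acc ++ [PySem.List.pyGetD els startIndex []]) []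
            if expandedTypeElements.length ≠ 0 then
              d.insert (PySem.Chars.join ['.'] expandedTypeElements) 1
            else d) d (k : Int)) d
      = ks.foldl (fun d k => d.insert (PySem.Chars.join ['.'] (els.take (k + 1))) 1) d := by
    intro ks
    induction ks with
    | nil => intro d _; rfl
    | cons k ks ihk =>
      intro d hks
      rw [List.foldl_cons, List.foldl_cons, hbody d k (hks k (by simp))]
      exact ihk _ (fun k hk => hks k (by simp [hk]))
  rw [hfold (List.range els.length) (PySem.Dict.mk []) (fun k hk => List.mem_range.mp hk)]
  have hm : ((List.range els.length).map (fun j => PySem.Chars.join ['.'] (els.take (j + 1)))).foldl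
        (fun (d : PySem.Dict (List Char) Int) k => d.insert k 1) (PySem.Dict.mk [])
      = (List.range els.length).foldl
        (fun d j => d.insert (PySem.Chars.join ['.'] (els.take (j + 1))) 1) (PySem.Dict.mk []) :=
    List.foldl_map
  rw [← hm, pvJoins_map_range]
  rw [pvDict_fold_keys (pvJoins els) (PySem.Dict.mk [])
      (by simpa [PySem.Dict.keys] using pvJoins_nodup els)]
  simp [PySem.Dict.keys]

theorem pvExpand_eq (t : String) :
    pvExpand t = (pvAddSeq t.toList).map String.ofList := by
  rw [pvAddSeq_eq, pvExpand, pvExpandDict_keys, pvSplitOn_dot]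

theorem pvScanB_eq (rest : List Char) : ∀ (pre : List Char) (s : PySem.Set String),
    pvScanB pre rest s
      = (pvAddSeq rest).foldl (fun s q => PySem.Set.add s (String.ofList (pre ++ q))) s := by
  induction rest with
  | nil => intro pre s; simp [pvScanB, pvAddSeq]
  | cons c cs ih =>
    intro pre s
    simp only [pvScanB, pvAddSeq, List.foldl_append, List.foldl_map, ih]
    have harg : ∀ q : List Char, pre ++ c :: q = (pre ++ [c]) ++ q := by
      intro q; simp
    by_cases hc : c = '.'
    · subst hc
      simp only [reduceIte, List.foldl_cons, List.foldl_nil, List.append_nil]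
      congr 1
      funext s q
      rw [harg q]
    · simp only [if_neg hc, List.foldl_nil]
      congr 1
      funext s q
      rw [harg q]

theorem pvPer_string (t : String) (s : PySem.Set String) :
    (pvExpand t).foldl PySem.Set.add s = pvScanB [] t.toList s := by
  rw [pvExpand_eq, pvScanB_eq, List.foldl_map]
  rfl

-- ===== VERDICT (by name: the statement is the Claim_ definition above) =====
theorem expanded_types_spec : Claim_equal_expanded_types := by
  intro entity_types _
  show expanded_types entity_types = expanded_types_alt entity_types
  unfold expanded_types expanded_types_alt
  congr 1
  funext s t
  exact pvPer_string t s
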